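-- pv_equiv track=rewrite | github.com/XyzHuy/-DL-Fine-tuning-coding-model | data/solution/Solution2198.py | singleDivisorTriplet
-- ===== SOURCE A (Python) =====
-- from collections import Counter
-- from typing import List
--
-- def singleDivisorTriplet(nums: List[int]) -> int:
--     count = Counter(nums)
--     unique_nums = list(count.keys())
--     n = len(unique_nums)
--     result = 0
--
--     # Iterate over all possible triplets (i, j, k)
--     for i in range(n):
--         for j in range(i, n):
--             for k in range(j, n):
--                 a, b, c = unique_nums[i], unique_nums[j], unique_nums[k]
--                 total = a + b + c
--
--                 # Check divisibility conditions
--                 divisors = sum(total % x == 0 for x in [a, b, c])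
--
--                 if divisors == 1:
--                     # Count permutations based on the number of unique elements
--                     if i == j == k:
--                         result += count[a] * (count[a] - 1) * (count[a] - 2) // 6
--                     elif i == j:
--                         result += count[a] * (count[a] - 1) // 2 * count[c]
--                     elif j == k:
--                         result += count[a] * count[b] * (count[b] - 1) // 2
--                     elif i == k:
--                         result += count[a] * (count[a] - 1) // 2 * count[b]
--                     else:
--                         result += count[a] * count[b] * count[c]
--
--     return result * 6
-- ===== SOURCE B (Python) =====
-- def _cond(a, b, c):
--     t = a + b + c
--     return (t % a == 0) + (t % b == 0) + (t % c == 0) == 1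
--
-- def singleDivisorTriplet(nums):
--     # Brute force over all index triples i<j<k (peeling heads with slices),
--     # counting triples whose sum is divisible by exactly one member; each
--     # unordered triple corresponds to 6 ordered ones.
--     res = 0
--     rest = list(nums)
--     while rest:
--         a, rest = rest[0], rest[1:]
--         r2 = rest
--         while r2:
--             b, r2 = r2[0], r2[1:]
--             for c in r2:
--                 if _cond(a, b, c):
--                     res += 1
--     return res * 6
-- ===== Notes on version B (the rewrite author's own statement) =====
-- stated objective: alternative
-- what changed: Replaced the Counter-based combinatorial count over unique values (binomial weights per equality pattern of a triple of distinct values) by a direct brute-force enumeration of all index triples i<j<k of the raw list, counting triples whose sum is divisible by exactly one member and multiplying by 6.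
import Mathlib
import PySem

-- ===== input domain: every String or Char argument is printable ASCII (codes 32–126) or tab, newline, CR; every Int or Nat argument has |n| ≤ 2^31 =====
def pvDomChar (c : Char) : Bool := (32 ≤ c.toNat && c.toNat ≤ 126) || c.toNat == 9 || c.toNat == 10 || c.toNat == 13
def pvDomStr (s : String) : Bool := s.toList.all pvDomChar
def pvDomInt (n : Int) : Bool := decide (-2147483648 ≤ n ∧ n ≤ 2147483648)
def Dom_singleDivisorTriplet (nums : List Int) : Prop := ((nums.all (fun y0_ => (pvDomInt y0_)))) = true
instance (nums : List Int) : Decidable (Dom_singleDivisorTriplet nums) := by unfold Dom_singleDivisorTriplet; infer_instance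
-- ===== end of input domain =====

-- B replaces A's Counter-over-unique-values combinatorics by a direct brute force over
-- all index triples i<j<k, ×6 for the ordered triples (alternative algorithm, not faster).

-- ===== PORT A =====
def singleDivisorTriplet (nums : List Int) : Int :=
  let count := PySem.Dict.counter nums
  let unique_nums := count.keys
  let n : Int := (unique_nums.length : Int)
  let result : Int :=
    (PySem.List.pyRange 0 n 1).foldl (fun result i =>
      (PySem.List.pyRange i n 1).foldl (fun result j =>
        (PySem.List.pyRange j n 1).foldl (fun result k =>
          let a := PySem.List.pyGetD unique_nums i 0
          let b := PySem.List.pyGetD unique_nums j 0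
          let c := PySem.List.pyGetD unique_nums k 0
          let total := a + b + c
          let divisors : Int :=
            (if PySem.Int.mod total a == 0 then 1 else 0) +
            ((if PySem.Int.mod total b == 0 then 1 else 0) +
             (if PySem.Int.mod total c == 0 then 1 else 0))
          if divisors == 1 then
            if i == j && j == k then
              result + PySem.Int.floordiv (count.getD a 0 * (count.getD a 0 - 1) * (count.getD a 0 - 2)) 6
            else if i == j then
              result + PySem.Int.floordiv (count.getD a 0 * (count.getD a 0 - 1)) 2 * count.getD c 0
            else if j == k then
              result + PySem.Int.floordiv (count.getD a 0 * count.getD b 0 * (count.getD b 0 - 1)) 2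
            else if i == k then
              result + PySem.Int.floordiv (count.getD a 0 * (count.getD a 0 - 1)) 2 * count.getD b 0
            else
              result + count.getD a 0 * count.getD b 0 * count.getD c 0
          else result) result) result) 0
  result * 6

-- ===== PORT B =====
-- _cond(a, b, c) from Source B
def bCond (a b c : Int) : Bool :=
  let t := a + b + c
  ((if PySem.Int.mod t a == 0 then (1 : Int) else 0) +
   ((if PySem.Int.mod t b == 0 then (1 : Int) else 0) +
    (if PySem.Int.mod t c == 0 then (1 : Int) else 0))) == 1

-- innermost 'for c in r2' loop
def bInner (a b res : Int) (r2 : List Int) : Int :=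
  r2.foldl (fun res c => if bCond a b c then res + 1 else res) res

-- middle 'while r2' loop (peel b = r2[0])
def bMid (a res : Int) : List Int → Int
  | [] => res
  | b :: r2 => bMid a (bInner a b res r2) r2

-- outer 'while rest' loop (peel a = rest[0])
def bOuter (res : Int) : List Int → Int
  | [] => res
  | a :: rest => bOuter (bMid a res rest) rest

def singleDivisorTriplet_alt (nums : List Int) : Int :=
  bOuter 0 nums * 6

-- ===== PRECONDITION & SPEC =====
-- Pre_ excludes lists containing 0: there 'total % x' divides by zero and A raises ZeroDivisionError (B raises too).
def Pre_singleDivisorTriplet (nums : List Int) : Prop := (0 : Int) ∉ nums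
instance (nums : List Int) : Decidable (Pre_singleDivisorTriplet nums) := by unfold Pre_singleDivisorTriplet; infer_instance
def pvWitness_singleDivisorTriplet : List Int := [3, 1, 2, 2]

def Spec_singleDivisorTriplet (nums : List Int) (out : Int) : Prop := out = singleDivisorTriplet_alt nums
instance (nums : List Int) (out : Int) : Decidable (Spec_singleDivisorTriplet nums out) := by unfold Spec_singleDivisorTriplet; infer_instance

-- ===== CLAIM (what is proved, stated in full; the proofs are below) =====
def Claim_equal_singleDivisorTriplet : Prop := ∀ (nums : List Int), Dom_singleDivisorTriplet nums → Pre_singleDivisorTriplet nums → Spec_singleDivisorTriplet nums (singleDivisorTriplet nums)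

-- ===== LEMMAS AND PROOFS =====

-- ---------- B-side counting functions (mathematical form of B's loops) ----------
def Scnt (a b : Int) (l : List Int) : Int := (l.countP (fun c => bCond a b c) : Int)

def Pb (a : Int) : List Int → Int
  | [] => 0
  | b :: r => Scnt a b r + Pb a r

def Tb : List Int → Int
  | [] => 0
  | a :: r => Pb a r + Tb r

lemma bInner_eq (a b res : Int) (l : List Int) : bInner a b res l = res + Scnt a b l := by
  unfold bInner Scnt
  exact PySem.List.foldl_if_add_one _ _ _

lemma bMid_eq (a : Int) (l : List Int) : ∀ res, bMid a res l = res + Pb a l := by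
  induction l with
  | nil => intro res; simp [bMid, Pb]
  | cons b r ih => intro res; simp [bMid, Pb, bInner_eq, ih]; ring

lemma bOuter_eq (l : List Int) : ∀ res, bOuter res l = res + Tb l := by
  induction l with
  | nil => intro res; simp [bOuter, Tb]
  | cons a r ih => intro res; simp [bOuter, Tb, bMid_eq, ih]; ring

-- ---------- symmetry of the divisibility test ----------
lemma bCond_swap12 (a b c : Int) : bCond a b c = bCond b a c := by
  unfold bCond
  have h : a + b + c = b + a + c := by ring
  rw [h]
  dsimp only
  split_ifs <;> rfl

lemma bCond_swap23 (a b c : Int) : bCond a b c = bCond a c b := by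
  unfold bCond
  have h : a + b + c = a + c + b := by ring
  rw [h]
  dsimp only
  split_ifs <;> rfl

-- ---------- permutation invariance of B's count ----------
lemma Scnt_perm (a b : Int) {l l' : List Int} (h : l.Perm l') : Scnt a b l = Scnt a b l' := by
  unfold Scnt; rw [h.countP_eq]

lemma Scnt_cons (a b c : Int) (l : List Int) :
    Scnt a b (c :: l) = (if bCond a b c then 1 else 0) + Scnt a b l := by
  unfold Scnt; rw [List.countP_cons]; split_ifs <;> push_cast <;> ring

lemma Scnt_swap (a b : Int) (l : List Int) : Scnt a b l = Scnt b a l := by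
  unfold Scnt
  congr 1
  apply List.countP_congr
  intro c _
  rw [bCond_swap12]

lemma Pb_perm (a : Int) {l l' : List Int} (h : l.Perm l') : Pb a l = Pb a l' := by
  induction h with
  | nil => rfl
  | cons x h ih => simp only [Pb]; rw [Scnt_perm a x h, ih]
  | swap x y t => simp only [Pb, Scnt_cons, bCond_swap23 a y x]; ring
  | trans h1 h2 ih1 ih2 => rw [ih1, ih2]

lemma Tb_perm : ∀ {l l' : List Int}, l.Perm l' → Tb l = Tb l' := by
  intro l l' h
  induction h with
  | nil => rfl
  | cons x h ih => simp only [Tb]; rw [Pb_perm x h, ih]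
  | swap x y t => simp only [Tb, Pb]; rw [Scnt_swap]; ring
  | trans h1 h2 ih1 ih2 => rw [ih1, ih2]

-- ---------- grouped (replicate) form ----------
def Grp (cnt : Int → Nat) : List Int → List Int
  | [] => []
  | x :: r => List.replicate (cnt x) x ++ Grp cnt r

def SVal (cnt : Int → Nat) (a b : Int) (l : List Int) : Int :=
  (l.map (fun c => if bCond a b c then (cnt c : Int) else 0)).sum

def PVal (cnt : Int → Nat) (a : Int) : List Int → Int
  | [] => 0
  | b :: r => (if bCond a b b then ((cnt b).choose 2 : Int) else 0)
      + (cnt b : Int) * SVal cnt a b r + PVal cnt a r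

def TVal (cnt : Int → Nat) : List Int → Int
  | [] => 0
  | a :: r => (if bCond a a a then ((cnt a).choose 3 : Int) else 0)
      + ((cnt a).choose 2 : Int) * SVal cnt a a r
      + (cnt a : Int) * PVal cnt a r + TVal cnt r

lemma Scnt_replicate (a b x : Int) (m : Nat) (l : List Int) :
    Scnt a b (List.replicate m x ++ l) = m * (if bCond a b x then 1 else 0) + Scnt a b l := by
  unfold Scnt
  rw [List.countP_append, List.countP_replicate]
  split_ifs <;> push_cast <;> ring

lemma Pb_replicate (a x : Int) (m : Nat) (l : List Int) :
    Pb a (List.replicate m x ++ l)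
      = (m.choose 2 : Int) * (if bCond a x x then 1 else 0) + m * Scnt a x l + Pb a l := by
  induction m with
  | zero => simp [Pb]
  | succ m ih =>
    rw [List.replicate_succ, List.cons_append]
    simp only [Pb]
    rw [ih, Scnt_replicate]
    have : (m + 1).choose 2 = m.choose 2 + m := by
      have h := Nat.choose_succ_succ m 1
      simp [Nat.choose_one_right] at h
      omega
    rw [this]
    push_cast
    ring

lemma Tb_replicate (x : Int) (m : Nat) (l : List Int) :
    Tb (List.replicate m x ++ l)
      = (m.choose 3 : Int) * (if bCond x x x then 1 else 0)
        + (m.choose 2 : Int) * Scnt x x l + m * Pb x l + Tb l := by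
  induction m with
  | zero => simp [Tb]
  | succ m ih =>
    rw [List.replicate_succ, List.cons_append]
    simp only [Tb]
    rw [ih, Pb_replicate]
    have h3 : (m + 1).choose 3 = m.choose 3 + m.choose 2 := by
      rw [Nat.choose_succ_succ]; ring
    have h2 : (m + 1).choose 2 = m.choose 2 + m := by
      have h := Nat.choose_succ_succ m 1
      simp [Nat.choose_one_right] at h
      omega
    rw [h3, h2]
    push_cast
    ring

lemma Scnt_Grp (cnt : Int → Nat) (a b : Int) (r : List Int) :
    Scnt a b (Grp cnt r) = SVal cnt a b r := by
  induction r with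
  | nil => simp [Grp, Scnt, SVal]
  | cons x r ih =>
    simp only [Grp, SVal, List.map_cons, List.sum_cons]
    rw [Scnt_replicate, ih]
    simp only [SVal]
    split_ifs <;> ring

lemma Pb_Grp (cnt : Int → Nat) (a : Int) (r : List Int) :
    Pb a (Grp cnt r) = PVal cnt a r := by
  induction r with
  | nil => rfl
  | cons x r ih =>
    simp only [Grp, PVal]
    rw [Pb_replicate, ih, Scnt_Grp]
    split_ifs <;> ring

lemma Tb_Grp (cnt : Int → Nat) (r : List Int) :
    Tb (Grp cnt r) = TVal cnt r := by
  induction r with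
  | nil => rfl
  | cons x r ih =>
    simp only [Grp, TVal]
    rw [Tb_replicate, ih, Scnt_Grp, Pb_Grp]
    split_ifs <;> ring

-- ---------- nums is a permutation of its grouped form ----------
lemma count_Grp (cnt : Int → Nat) (y : Int) :
    ∀ (U : List Int), U.Nodup →
      (Grp cnt U).count y = if y ∈ U then cnt y else 0 := by
  intro U
  induction U with
  | nil => simp [Grp]
  | cons x r ih =>
    intro hnd
    rcases List.nodup_cons.mp hnd with ⟨hx, hr⟩
    simp only [Grp, List.count_append, List.count_replicate, ih hr]
    by_cases hyx : y = x
    · subst hyx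
      simp [hx]
    · simp [hyx, Ne.symm hyx]

lemma perm_Grp (nums : List Int) :
    nums.Perm (Grp (fun x => nums.count x) (PySem.List.dedup nums)) := by
  rw [List.perm_iff_count]
  intro y
  rw [count_Grp _ y _ (by simpa using PySem.List.nodup_dedup (xs := nums))]
  by_cases hy : y ∈ nums
  · simp [hy]
  · simp [hy, List.count_eq_zero_of_not_mem hy]

-- ---------- A-side spec functions (floordiv-weight form) ----------
def fdC3 (ct : Int → Int) (a : Int) : Int := PySem.Int.floordiv (ct a * (ct a - 1) * (ct a - 2)) 6
def fdC2 (ct : Int → Int) (a : Int) : Int := PySem.Int.floordiv (ct a * (ct a - 1)) 2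
def fdBB (ct : Int → Int) (a b : Int) : Int := PySem.Int.floordiv (ct a * ct b * (ct b - 1)) 2

def ASf (ct : Int → Int) (a b : Int) (l : List Int) : Int :=
  (l.map (fun c => if bCond a b c then ct a * ct b * ct c else 0)).sum

def ASg (ct : Int → Int) (a : Int) (l : List Int) : Int :=
  (l.map (fun c => if bCond a a c then fdC2 ct a * ct c else 0)).sum

def APf (ct : Int → Int) (a : Int) : List Int → Int
  | [] => 0
  | b :: r => (if bCond a b b then fdBB ct a b else 0) + ASf ct a b r + APf ct a r

def ATf (ct : Int → Int) : List Int → Int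
  | [] => 0
  | a :: r => (if bCond a a a then fdC3 ct a else 0) + ASg ct a r + APf ct a r + ATf ct r

-- ---------- floordiv weights are binomial coefficients ----------
lemma two_choose_two (k : Nat) : 2 * (k+1).choose 2 = (k+1)*k := by
  have h := Nat.choose_two_right (k+1)
  have hd : 2 ∣ (k+1)*k := by
    rcases Nat.even_mul_succ_self k with ⟨c, hc⟩
    exact ⟨c, by rw [Nat.mul_comm]; omega⟩
  rw [h]
  simp only [Nat.add_sub_cancel]
  exact Nat.mul_div_cancel' hd

lemma six_choose_three (k : Nat) : 6 * (k+2).choose 3 = (k+2)*(k+1)*k := by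
  induction k with
  | zero => decide
  | succ k ih =>
    have hs : (k+3).choose 3 = (k+2).choose 2 + (k+2).choose 3 := Nat.choose_succ_succ (k+2) 2
    have h2 := two_choose_two (k+1)
    calc 6 * (k+1+2).choose 3 = 3 * (2 * (k+2).choose 2) + 6 * (k+2).choose 3 := by
          rw [show k+1+2 = k+3 by omega, hs]; ring
      _ = 3 * ((k+2)*(k+1)) + (k+2)*(k+1)*k := by rw [h2, ih]
      _ = (k+1+2)*(k+1+1)*(k+1) := by ring

lemma fd3_eq (m : Nat) :
    PySem.Int.floordiv ((m:Int) * ((m:Int) - 1) * ((m:Int) - 2)) 6 = (m.choose 3 : Int) := by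
  match m with
  | 0 => decide
  | 1 => decide
  | (k+2) =>
    have h1 : ((k+2:Nat):Int) * (((k+2:Nat):Int) - 1) * (((k+2:Nat):Int) - 2)
        = (((k+2)*(k+1)*k : Nat) : Int) := by push_cast; ring
    rw [h1]
    have h2 := PySem.Int.floordiv_natCast ((k+2)*(k+1)*k) 6
    have h3 : (k+2).choose 3 = (k+2)*(k+1)*k/6 := by
      have := six_choose_three k; omega
    rw [show ((6:Int)) = ((6:Nat):Int) by norm_cast, h2, h3]

lemma fd2_eq (m : Nat) :
    PySem.Int.floordiv ((m:Int) * ((m:Int) - 1)) 2 = (m.choose 2 : Int) := by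
  cases m with
  | zero => decide
  | succ k =>
    have h1 : ((k+1:Nat):Int) * (((k+1:Nat):Int) - 1) = (((k+1)*k : Nat) : Int) := by push_cast; ring
    rw [h1]
    have h2 := PySem.Int.floordiv_natCast ((k+1)*k) 2
    have h3 : (k+1).choose 2 = (k+1)*k/2 := by
      rw [Nat.choose_two_right]; simp
    rw [show ((2:Int)) = ((2:Nat):Int) by norm_cast, h2, h3]

lemma fdnm_eq (n m : Nat) :
    PySem.Int.floordiv ((n:Int) * (m:Int) * ((m:Int) - 1)) 2 = (n:Int) * (m.choose 2 : Int) := by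
  match m with
  | 0 =>
    have h1 : ((n:Int)) * ((0:Nat):Int) * (((0:Nat):Int) - 1) = 0 := by push_cast; ring
    rw [h1]
    have h0 : PySem.Int.floordiv 0 2 = 0 := by decide
    rw [h0]
    simp [Nat.choose]
  | (k+1) =>
    have h1 : ((n:Int)) * ((k+1:Nat):Int) * (((k+1:Nat):Int) - 1) = ((n*((k+1)*k) : Nat) : Int) := by
      push_cast; ring
    rw [h1]
    have h2 := PySem.Int.floordiv_natCast (n*((k+1)*k)) 2
    have hdvd : 2 ∣ (k+1)*k := by
      rcases Nat.even_mul_succ_self k with ⟨c, hc⟩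
      exact ⟨c, by rw [Nat.mul_comm]; omega⟩
    have h3 : n*((k+1)*k)/2 = n * ((k+1)*k/2) := Nat.mul_div_assoc n hdvd
    have h4 : (k+1).choose 2 = (k+1)*k/2 := by rw [Nat.choose_two_right]; simp
    rw [show ((2:Int)) = ((2:Nat):Int) by norm_cast, h2, h3, h4]
    push_cast
    ring

lemma fdC3_choose (cnt : Int → Nat) (a : Int) :
    fdC3 (fun x => (cnt x : Int)) a = ((cnt a).choose 3 : Int) := by
  simpa [fdC3] using fd3_eq (cnt a)

lemma fdC2_choose (cnt : Int → Nat) (a : Int) :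
    fdC2 (fun x => (cnt x : Int)) a = ((cnt a).choose 2 : Int) := by
  simpa [fdC2] using fd2_eq (cnt a)

lemma fdBB_choose (cnt : Int → Nat) (a b : Int) :
    fdBB (fun x => (cnt x : Int)) a b = (cnt a : Int) * ((cnt b).choose 2 : Int) := by
  simpa [fdBB] using fdnm_eq (cnt a) (cnt b)

-- ---------- A-side spec = grouped B-side count ----------
lemma ASf_eq (cnt : Int → Nat) (a b : Int) (l : List Int) :
    ASf (fun x => (cnt x : Int)) a b l = (cnt a : Int) * ((cnt b : Int) * SVal cnt a b l) := by
  induction l with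
  | nil => simp [ASf, SVal]
  | cons c l ih =>
    simp only [ASf, SVal, List.map_cons, List.sum_cons] at *
    rw [ih]
    split_ifs <;> ring

lemma APf_eq (cnt : Int → Nat) (a : Int) (l : List Int) :
    APf (fun x => (cnt x : Int)) a l = (cnt a : Int) * PVal cnt a l := by
  induction l with
  | nil => simp [APf, PVal]
  | cons b l ih =>
    simp only [APf, PVal]
    rw [ih, ASf_eq, fdBB_choose]
    split_ifs <;> ring

lemma ASg_eq (cnt : Int → Nat) (a : Int) (l : List Int) :
    ASg (fun x => (cnt x : Int)) a l = ((cnt a).choose 2 : Int) * SVal cnt a a l := by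
  induction l with
  | nil => simp [ASg, SVal]
  | cons c l ih =>
    simp only [ASg, SVal, List.map_cons, List.sum_cons] at *
    rw [ih, fdC2_choose]
    split_ifs <;> ring

lemma ATf_eq (cnt : Int → Nat) (l : List Int) :
    ATf (fun x => (cnt x : Int)) l = TVal cnt l := by
  induction l with
  | nil => rfl
  | cons a l ih =>
    simp only [ATf, TVal]
    rw [ih, ASg_eq, APf_eq, fdC3_choose]

-- ---------- port A evaluates to ATf ----------
-- additive contribution of one (i, j, k) iteration of A's triple loop
def wA (ct : Int → Int) (U : List Int) (i j k : Int) : Int :=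
  let a := PySem.List.pyGetD U i 0
  let b := PySem.List.pyGetD U j 0
  let c := PySem.List.pyGetD U k 0
  if bCond a b c then
    if i == j && j == k then fdC3 ct a
    else if i == j then fdC2 ct a * ct c
    else if j == k then fdBB ct a b
    else if i == k then fdC2 ct a * ct b
    else ct a * ct b * ct c
  else 0

def sumK (ct : Int → Int) (U : List Int) (i j : Int) : Int :=
  ((PySem.List.pyRange j ((U.length : Int)) 1).map (fun k => wA ct U i j k)).sum

def sumJ (ct : Int → Int) (U : List Int) (i : Int) : Int :=
  ((PySem.List.pyRange i ((U.length : Int)) 1).map (fun j => sumK ct U i j)).sum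

lemma foldK (cnt : PySem.Dict Int Int) (U : List Int) (i j res : Int) :
    (PySem.List.pyRange j ((U.length : Int)) 1).foldl (fun result k =>
          let a := PySem.List.pyGetD U i 0
          let b := PySem.List.pyGetD U j 0
          let c := PySem.List.pyGetD U k 0
          let total := a + b + c
          let divisors : Int :=
            (if PySem.Int.mod total a == 0 then 1 else 0) +
            ((if PySem.Int.mod total b == 0 then 1 else 0) +
             (if PySem.Int.mod total c == 0 then 1 else 0))
          if divisors == 1 then
            if i == j && j == k then
              result + PySem.Int.floordiv (cnt.getD a 0 * (cnt.getD a 0 - 1) * (cnt.getD a 0 - 2)) 6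
            else if i == j then
              result + PySem.Int.floordiv (cnt.getD a 0 * (cnt.getD a 0 - 1)) 2 * cnt.getD c 0
            else if j == k then
              result + PySem.Int.floordiv (cnt.getD a 0 * cnt.getD b 0 * (cnt.getD b 0 - 1)) 2
            else if i == k then
              result + PySem.Int.floordiv (cnt.getD a 0 * (cnt.getD a 0 - 1)) 2 * cnt.getD b 0
            else
              result + cnt.getD a 0 * cnt.getD b 0 * cnt.getD c 0
          else result) res
      = res + sumK (fun x => cnt.getD x 0) U i j := by
  rw [PySem.List.foldl_congr_mem _ _
    (fun result k => result + wA (fun x => cnt.getD x 0) U i j k) res ?_]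
  · exact PySem.List.foldl_add _ _ _
  · intro acc k _
    unfold wA bCond fdC3 fdC2 fdBB
    dsimp only
    split_ifs <;> ring

lemma foldJK (cnt : PySem.Dict Int Int) (U : List Int) (i res : Int) :
    (PySem.List.pyRange i ((U.length : Int)) 1).foldl (fun result j =>
      (PySem.List.pyRange j ((U.length : Int)) 1).foldl (fun result k =>
          let a := PySem.List.pyGetD U i 0
          let b := PySem.List.pyGetD U j 0
          let c := PySem.List.pyGetD U k 0
          let total := a + b + c
          let divisors : Int :=
            (if PySem.Int.mod total a == 0 then 1 else 0) +
            ((if PySem.Int.mod total b == 0 then 1 else 0) +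
             (if PySem.Int.mod total c == 0 then 1 else 0))
          if divisors == 1 then
            if i == j && j == k then
              result + PySem.Int.floordiv (cnt.getD a 0 * (cnt.getD a 0 - 1) * (cnt.getD a 0 - 2)) 6
            else if i == j then
              result + PySem.Int.floordiv (cnt.getD a 0 * (cnt.getD a 0 - 1)) 2 * cnt.getD c 0
            else if j == k then
              result + PySem.Int.floordiv (cnt.getD a 0 * cnt.getD b 0 * (cnt.getD b 0 - 1)) 2
            else if i == k then
              result + PySem.Int.floordiv (cnt.getD a 0 * (cnt.getD a 0 - 1)) 2 * cnt.getD b 0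
            else
              result + cnt.getD a 0 * cnt.getD b 0 * cnt.getD c 0
          else result) result) res
      = res + sumJ (fun x => cnt.getD x 0) U i := by
  rw [PySem.List.foldl_congr_mem _ _
    (fun result j => result + sumK (fun x => cnt.getD x 0) U i j) res ?_]
  · exact PySem.List.foldl_add _ _ _
  · intro acc j _
    exact foldK cnt U i j acc

-- innermost sums over a range of indices are sums over the corresponding suffix
lemma tailSum (U : List Int) (φ : Int → Int) (t : Nat) :
    ((PySem.List.pyRange (t : Int) ((U.length : Int)) 1).map
        (fun k => φ (PySem.List.pyGetD U k 0))).sum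
      = ((U.drop t).map φ).sum := by
  have h := PySem.List.map_pyGetD_pyRange' U 0 (a := (t : Int)) (by positivity)
  calc ((PySem.List.pyRange (t : Int) ((U.length : Int)) 1).map
        (fun k => φ (PySem.List.pyGetD U k 0))).sum
      = (((PySem.List.pyRange (t : Int) ((U.length : Int)) 1).map
          (fun k => PySem.List.pyGetD U k 0)).map φ).sum := by rw [List.map_map]; rfl
    _ = ((U.drop t).map φ).sum := by rw [h]; simp

lemma sumK_diag (ct : Int → Int) (U : List Int) (t : Nat) (h : t < U.length) :
    sumK ct U (t : Int) (t : Int)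
      = (if bCond U[t] U[t] U[t] then fdC3 ct U[t] else 0) + ASg ct U[t] (U.drop (t+1)) := by
  have hget : PySem.List.pyGetD U (t : Int) 0 = U[t] := by
    rw [PySem.List.pyGetD_natCast, List.getD_eq_getElem _ _ h]
  unfold sumK
  rw [PySem.List.pyRange_one_cons (by exact_mod_cast h), List.map_cons, List.sum_cons]
  have hhead : wA ct U (t : Int) (t : Int) (t : Int)
      = (if bCond U[t] U[t] U[t] then fdC3 ct U[t] else 0) := by
    unfold wA
    dsimp only
    rw [hget]
    simp
  rw [hhead]
  have hcast : ((t : Int) + 1) = ((t + 1 : Nat) : Int) := by push_cast; ring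
  have htail : ((PySem.List.pyRange ((t : Int) + 1) ((U.length : Int)) 1).map
        (fun k => wA ct U (t : Int) (t : Int) k)).sum = ASg ct U[t] (U.drop (t+1)) := by
    rw [List.map_congr_left (g := fun k =>
        if bCond U[t] U[t] (PySem.List.pyGetD U k 0)
          then fdC2 ct U[t] * ct (PySem.List.pyGetD U k 0) else 0) ?_]
    · rw [hcast]
      rw [tailSum U (fun c => if bCond U[t] U[t] c then fdC2 ct U[t] * ct c else 0) (t+1)]
      rfl
    · intro k hk
      rw [PySem.List.mem_pyRange_one] at hk
      have hne : ((t : Int) == k) = false := by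
        simp only [beq_eq_false_iff_ne]
        omega
      unfold wA
      dsimp only
      rw [hget, hne]
      simp
  rw [htail]

lemma sumK_off (ct : Int → Int) (U : List Int) (i : Int) (t : Nat)
    (hit : i < (t : Int)) (h : t < U.length) :
    sumK ct U i (t : Int)
      = (if bCond (PySem.List.pyGetD U i 0) U[t] U[t]
            then fdBB ct (PySem.List.pyGetD U i 0) U[t] else 0)
        + ASf ct (PySem.List.pyGetD U i 0) U[t] (U.drop (t+1)) := by
  have hget : PySem.List.pyGetD U (t : Int) 0 = U[t] := by
    rw [PySem.List.pyGetD_natCast, List.getD_eq_getElem _ _ h]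
  have hij : (i == (t : Int)) = false := by
    simp only [beq_eq_false_iff_ne]
    omega
  unfold sumK
  rw [PySem.List.pyRange_one_cons (by exact_mod_cast h), List.map_cons, List.sum_cons]
  have hhead : wA ct U i (t : Int) (t : Int)
      = (if bCond (PySem.List.pyGetD U i 0) U[t] U[t]
            then fdBB ct (PySem.List.pyGetD U i 0) U[t] else 0) := by
    unfold wA
    dsimp only
    rw [hget, hij]
    simp
  rw [hhead]
  have hcast : ((t : Int) + 1) = ((t + 1 : Nat) : Int) := by push_cast; ring
  have htail : ((PySem.List.pyRange ((t : Int) + 1) ((U.length : Int)) 1).map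
        (fun k => wA ct U i (t : Int) k)).sum
      = ASf ct (PySem.List.pyGetD U i 0) U[t] (U.drop (t+1)) := by
    rw [List.map_congr_left (g := fun k =>
        if bCond (PySem.List.pyGetD U i 0) U[t] (PySem.List.pyGetD U k 0)
          then ct (PySem.List.pyGetD U i 0) * ct U[t] * ct (PySem.List.pyGetD U k 0) else 0) ?_]
    · rw [hcast]
      rw [tailSum U (fun c => if bCond (PySem.List.pyGetD U i 0) U[t] c
          then ct (PySem.List.pyGetD U i 0) * ct U[t] * ct c else 0) (t+1)]
      rfl
    · intro k hk
      rw [PySem.List.mem_pyRange_one] at hk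
      have hjk : ((t : Int) == k) = false := by
        simp only [beq_eq_false_iff_ne]
        omega
      have hik : (i == k) = false := by
        simp only [beq_eq_false_iff_ne]
        omega
      unfold wA
      dsimp only
      rw [hget, hij, hjk, hik]
      simp
  rw [htail]

lemma midSum (ct : Int → Int) (U : List Int) (i : Int) :
    ∀ (d t : Nat), U.length = t + d → i < (t : Int) →
      ((PySem.List.pyRange (t : Int) ((U.length : Int)) 1).map
          (fun j => sumK ct U i j)).sum
        = APf ct (PySem.List.pyGetD U i 0) (U.drop t) := by
  intro d
  induction d with
  | zero =>
    intro t hlen _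
    rw [PySem.List.pyRange_one_eq_nil (by omega)]
    rw [show t = U.length by omega, List.drop_length]
    rfl
  | succ d ih =>
    intro t hlen hit
    have ht : t < U.length := by omega
    rw [PySem.List.pyRange_one_cons (by exact_mod_cast ht), List.map_cons, List.sum_cons]
    rw [sumK_off ct U i t hit ht]
    have hcast : ((t : Int) + 1) = ((t + 1 : Nat) : Int) := by push_cast; ring
    rw [hcast, ih (t+1) (by omega) (by push_cast; omega)]
    rw [List.drop_eq_getElem_cons ht]
    simp only [APf]

lemma sumJ_diag (ct : Int → Int) (U : List Int) (t : Nat) (hlen : t < U.length) :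
    sumJ ct U (t : Int)
      = (if bCond U[t] U[t] U[t] then fdC3 ct U[t] else 0)
        + ASg ct U[t] (U.drop (t+1))
        + APf ct U[t] (U.drop (t+1)) := by
  have hget : PySem.List.pyGetD U (t : Int) 0 = U[t] := by
    rw [PySem.List.pyGetD_natCast, List.getD_eq_getElem _ _ hlen]
  unfold sumJ
  rw [PySem.List.pyRange_one_cons (by exact_mod_cast hlen), List.map_cons, List.sum_cons]
  rw [sumK_diag ct U t hlen]
  have hcast : ((t : Int) + 1) = ((t + 1 : Nat) : Int) := by push_cast; ring
  rw [hcast, midSum ct U (t : Int) (U.length - (t+1)) (t+1) (by omega)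
      (by push_cast; omega)]
  rw [hget]

lemma outSum (ct : Int → Int) (U : List Int) :
    ∀ (d t : Nat), U.length = t + d →
      ((PySem.List.pyRange (t : Int) ((U.length : Int)) 1).map
          (fun i => sumJ ct U i)).sum
        = ATf ct (U.drop t) := by
  intro d
  induction d with
  | zero =>
    intro t hlen
    rw [PySem.List.pyRange_one_eq_nil (by omega)]
    rw [show t = U.length by omega, List.drop_length]
    rfl
  | succ d ih =>
    intro t hlen
    have ht : t < U.length := by omega
    rw [PySem.List.pyRange_one_cons (by exact_mod_cast ht), List.map_cons, List.sum_cons]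
    rw [sumJ_diag ct U t ht]
    have hcast : ((t : Int) + 1) = ((t + 1 : Nat) : Int) := by push_cast; ring
    rw [hcast, ih (t+1) (by omega)]
    rw [List.drop_eq_getElem_cons ht]
    simp only [ATf]

lemma portA_eq (nums : List Int) :
    singleDivisorTriplet nums
      = ATf (fun x => (PySem.Dict.counter nums).getD x 0) (PySem.List.dedup nums) * 6 := by
  unfold singleDivisorTriplet
  dsimp only
  congr 1
  rw [PySem.List.foldl_congr_mem _ _
    (fun result i => result + sumJ (fun x => (PySem.Dict.counter nums).getD x 0)
      (PySem.Dict.counter nums).keys i) 0 ?_]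
  · rw [PySem.List.foldl_add, zero_add]
    have h0 : ((0 : Int)) = ((0 : Nat) : Int) := by norm_cast
    rw [h0, outSum _ _ (PySem.Dict.counter nums).keys.length 0 (by omega)]
    rw [List.drop_zero, PySem.Dict.keys_counter, PySem.List.dedup_eq_ofList]
  · intro acc i _
    exact foldJK (PySem.Dict.counter nums) (PySem.Dict.counter nums).keys i acc

-- ===== VERDICT (by name: the statement is the Claim_ definition above) =====
theorem singleDivisorTriplet_spec : Claim_equal_singleDivisorTriplet := by
  intro nums _ _
  unfold Spec_singleDivisorTriplet
  rw [portA_eq]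
  unfold singleDivisorTriplet_alt
  rw [bOuter_eq, zero_add]
  have hct : (fun x => (PySem.Dict.counter nums).getD x 0) = (fun x => ((nums.count x : Nat) : Int)) := by
    funext x
    simpa using PySem.Dict.getD_counter (xs := nums) (v := x)
  rw [hct, ATf_eq, ← Tb_Grp, Tb_perm (perm_Grp nums)]
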